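-- pv_equiv track=rewrite | github.com/hongsungheejin/Algo-Study | mah/Programmers/메뉴 리뉴얼.py | solution
-- ===== SOURCE A (Python) =====
-- from itertools import combinations
--
-- def solution(orders, course):
--     candi = {}
--     course = set(course)
--     for order in orders:
--         order = sorted(order)
--
--         for i in range(2, len(order)+1):
--             for combi in combinations(order, i):
--                 combi = "".join(combi)
--                 if combi in candi:
--                     candi[combi] += 1
--                 else:
--                     candi[combi] = 1
--
--     answer = []
--     candis = {k:v for k, v in sorted(candi.items(), key=lambda x: (len(x[0]), x[1])) if v>=2}
--     for c in course:
--         tmp = {}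
--         max_v = 0
--         for k, v in sorted(candis.items(), key=lambda x:x[0]):
--             if len(k) == c:
--                 max_v = max(max_v, v)
--                 if v in tmp: tmp[v].append(k)
--                 else: tmp[v] = [k]
--
--         if max_v in tmp:
--             answer.extend(tmp[max_v])
--
--     return sorted(answer)
-- ===== SOURCE B (Python) =====
-- from itertools import combinations
-- from collections import Counter
--
-- def solution(orders, course):
--     sorted_orders = ["".join(sorted(o)) for o in orders]
--     max_len = max(map(len, orders), default=0)
--     answer = []
--     for c in set(course):
--         if c < 2 or c > max_len:
--             continue
--         cnt = Counter("".join(combo) for o in sorted_orders for combo in combinations(o, c))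
--         m = max(cnt.values(), default=0)
--         if m >= 2:
--             answer.extend(k for k, v in cnt.items() if v == m)
--     return sorted(answer)
-- ===== Notes on version B (the rewrite author's own statement) =====
-- stated objective: faster
-- what changed: Instead of A's single dict counting combinations of every size 2..len(order) followed by a global (length,count)-sort, a v>=2 dict comprehension and a per-size sort-and-bucket-by-count pass, B loops over the distinct course sizes only (skipping sizes below 2 or beyond the longest order), builds one Counter of just that size's combinations, and takes the keys hitting that Counter's max when it is at least 2.
import Mathlib
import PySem

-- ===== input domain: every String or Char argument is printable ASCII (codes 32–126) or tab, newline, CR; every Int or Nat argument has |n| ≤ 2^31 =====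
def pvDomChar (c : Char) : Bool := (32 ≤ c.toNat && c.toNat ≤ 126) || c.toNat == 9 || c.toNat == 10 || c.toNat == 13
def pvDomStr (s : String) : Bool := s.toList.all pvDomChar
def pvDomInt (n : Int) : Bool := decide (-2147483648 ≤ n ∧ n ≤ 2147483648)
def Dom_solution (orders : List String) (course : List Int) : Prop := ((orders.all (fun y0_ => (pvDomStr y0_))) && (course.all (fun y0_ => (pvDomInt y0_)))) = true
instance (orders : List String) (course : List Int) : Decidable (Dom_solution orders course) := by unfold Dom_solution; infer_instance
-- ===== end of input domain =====

-- B replaces A's all-sizes dict + sort-and-bucket-by-count selection with, per requested course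
-- size only, a single Counter of that size's combinations and a direct max/filter (faster: it
-- never generates combinations of sizes course does not ask for, and never sorts all keys).

-- ===== PORT A =====
-- the dict `candi` built by A's triple loop (orders × sizes 2..len × combinations)
def solA_candi (orders : List String) : PySem.Dict String Int :=
  orders.foldl (fun candi order =>
    let order' := PySem.List.sorted order.toList (fun x => x) false
    (PySem.List.pyRange 2 (PySem.List.len order' + 1) 1).foldl (fun candi i =>
      (PySem.List.combinations order' i.toNat).foldl (fun candi combi =>
        let combiS := String.ofList combi
        if candi.contains combiS then candi.insert combiS (candi.getD combiS 0 + 1)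
        else candi.insert combiS 1) candi) candi) PySem.Dict.empty

-- the dict comprehension `candis` (sorted items, kept if v >= 2)
def solA_candis (orders : List String) : PySem.Dict String Int :=
  (PySem.List.sorted2 (solA_candi orders).items (fun x => PySem.Str.len x.1) (fun x => x.2) false).foldl
    (fun d kv => if 2 ≤ kv.2 then d.insert kv.1 kv.2 else d) PySem.Dict.empty

-- A's inner loop for one course size c: the grouping dict `tmp` and the running `max_v`
def solA_row (candis : PySem.Dict String Int) (c : Int) : PySem.Dict Int (List String) × Int :=
  (PySem.List.sorted candis.items (fun x => x.1) false).foldl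
    (fun st kv =>
      if PySem.Str.len kv.1 = c then
        ((if st.1.contains kv.2 then st.1.modify kv.2 [] (fun l => l ++ [kv.1])
          else st.1.insert kv.2 [kv.1]),
         max st.2 kv.2)
      else st) (PySem.Dict.empty, 0)

-- Python iterates `set(course)`; the returned value is sorted and (as proved below) each size
-- contributes an order-independent batch, so the port iterates the set in first-occurrence order.
def solution (orders : List String) (course : List Int) : List String :=
  let candis := solA_candis orders
  let answer := (PySem.Set.ofList course).foldl (fun answer c =>
    let st := solA_row candis c
    if st.1.contains st.2 then answer ++ st.1.getD st.2 [] else answer) []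
  PySem.List.sorted answer (fun x => x) false

-- ===== PORT B =====
-- Counter of all length-c combinations over the pre-sorted orders
def solB_count (sortedOrders : List String) (c : Int) : PySem.Dict String Int :=
  PySem.Dict.counter (sortedOrders.flatMap (fun o =>
    (PySem.List.combinations o.toList c.toNat).map String.ofList))

def solution_alt (orders : List String) (course : List Int) : List String :=
  let sortedOrders := orders.map (fun o => String.ofList (PySem.List.sorted o.toList (fun x => x) false))
  let maxLen := PySem.List.maxD (orders.map (fun o => PySem.Str.len o)) (fun x => x) 0
  let answer := (PySem.Set.ofList course).foldl (fun answer c =>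
    if c < 2 ∨ maxLen < c then answer
    else
      let cnt := solB_count sortedOrders c
      let m := PySem.List.maxD cnt.values (fun x => x) 0
      if 2 ≤ m then answer ++ (cnt.items.filter (fun kv => kv.2 == m)).map (fun kv => kv.1)
      else answer) []
  PySem.List.sorted answer (fun x => x) false

-- ===== PRECONDITION & SPEC =====
def Spec_solution (orders : List String) (course : List Int) (out : List String) : Prop := out = solution_alt orders course
instance (orders : List String) (course : List Int) (out : List String) : Decidable (Spec_solution orders course out) := by unfold Spec_solution; infer_instance

-- ===== CLAIM (what is proved, stated in full; the proofs are below) =====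
def Claim_equal_solution : Prop := ∀ (orders : List String) (course : List Int), Dom_solution orders course → Spec_solution orders course (solution orders course)

-- ===== LEMMAS AND PROOFS =====

-- the sorted character list of one order
def pvChars (o : String) : List Char := PySem.List.sorted o.toList (fun x => x) false

-- all length-c combination strings over all orders (B's per-size list)
def pvCombos (orders : List String) (c : Nat) : List String :=
  orders.flatMap (fun o => (PySem.List.combinations (pvChars o) c).map String.ofList)

-- all combination strings of every size 2..len (A's key list, with multiplicity)
def pvAll (orders : List String) : List String :=
  orders.flatMap (fun o =>
    (PySem.List.pyRange 2 (PySem.List.len (pvChars o) + 1) 1).flatMap (fun i =>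
      (PySem.List.combinations (pvChars o) i.toNat).map String.ofList))

-- what A appends for one course size
def pvAc (orders : List String) (c : Int) : List String :=
  let st := solA_row (solA_candis orders) c
  if st.1.contains st.2 then st.1.getD st.2 [] else []

-- what B appends for one course size
def pvBc (orders : List String) (c : Int) : List String :=
  if c < 2 ∨ PySem.List.maxD (orders.map (fun o => PySem.Str.len o)) (fun x => x) 0 < c then []
  else
    let cnt := solB_count (orders.map (fun o => String.ofList (PySem.List.sorted o.toList (fun x => x) false))) c
    let m := PySem.List.maxD cnt.values (fun x => x) 0
    if 2 ≤ m then (cnt.items.filter (fun kv => kv.2 == m)).map (fun kv => kv.1) else []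

lemma candi_eq (orders : List String) :
    solA_candi orders = PySem.Dict.counter (pvAll orders) := by
  have hstep : ∀ (d : PySem.Dict String Int) (s : String),
      (if d.contains s then d.insert s (d.getD s 0 + 1) else d.insert s 1)
        = d.insert s (d.getD s 0 + 1) := by
    intro d s
    by_cases h : d.contains s
    · simp [h]
    · simp only [Bool.not_eq_true] at h
      simp [h, PySem.Dict.getD_of_not_contains d 0 h]
  rw [← PySem.Dict.foldl_insert_getD_add_one_eq_counter]
  simp only [solA_candi, pvAll, pvChars, List.foldl_flatMap, List.foldl_map, hstep]

lemma mem_pvCombos_len (orders : List String) (c : Nat) (s : String)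
    (h : s ∈ pvCombos orders c) : s.toList.length = c := by
  simp only [pvCombos, List.mem_flatMap, List.mem_map] at h
  obtain ⟨o, -, cs, hcs, rfl⟩ := h
  simp [PySem.List.length_of_mem_combinations hcs]

lemma mem_pvAll_iff (orders : List String) (s : String) :
    s ∈ pvAll orders ↔ 2 ≤ s.toList.length ∧ s ∈ pvCombos orders s.toList.length := by
  constructor
  · intro h
    simp only [pvAll, List.mem_flatMap, List.mem_map, PySem.List.mem_pyRange_one] at h
    obtain ⟨o, ho, i, ⟨h2i, hilt⟩, cs, hcs, rfl⟩ := h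
    have hlen := PySem.List.length_of_mem_combinations hcs
    have hsl : (String.ofList cs).toList = cs := by simp
    rw [hsl]
    have hit : i.toNat = cs.length := hlen.symm
    refine ⟨by omega, ?_⟩
    simp only [pvCombos, List.mem_flatMap, List.mem_map]
    exact ⟨o, ho, cs, hit ▸ hcs, rfl⟩
  · rintro ⟨h2, h⟩
    simp only [pvCombos, List.mem_flatMap, List.mem_map] at h
    obtain ⟨o, ho, cs, hcs, heq⟩ := h
    have hlen := PySem.List.length_of_mem_combinations hcs
    have hle : cs.length ≤ (pvChars o).length :=
      (PySem.List.sublist_of_mem_combinations hcs).length_le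
    simp only [pvAll, List.mem_flatMap, List.mem_map, PySem.List.mem_pyRange_one,
      PySem.List.len_eq]
    refine ⟨o, ho, (s.toList.length : Int), ⟨by omega, by omega⟩, cs, by simpa using hcs, heq⟩

lemma pvSumSingle {f : Int → Nat} {L : List Int} (hnd : L.Nodup) (c : Int)
    (h0 : ∀ i ∈ L, i ≠ c → f i = 0) :
    (L.map f).sum = if c ∈ L then f c else 0 := by
  induction L with
  | nil => simp
  | cons a t ih =>
    rw [List.nodup_cons] at hnd
    simp only [List.map_cons, List.sum_cons, List.mem_cons]
    by_cases hac : a = c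
    · subst hac
      have ht : ∀ i ∈ t, i ≠ a → f i = 0 := fun i hi => h0 i (List.mem_cons_of_mem _ hi)
      rw [ih hnd.2 ht]
      simp [hnd.1]
    · rw [h0 a (List.mem_cons_self) hac, ih hnd.2
        (fun i hi => h0 i (List.mem_cons_of_mem _ hi))]
      simp [Ne.symm hac]

lemma count_pvAll (orders : List String) (c : Nat) (s : String)
    (hc : 2 ≤ c) (hs : s.toList.length = c) :
    (pvAll orders).count s = (pvCombos orders c).count s := by
  simp only [pvAll, pvCombos, List.count_flatMap]
  congr 1
  apply List.map_congr_left
  intro o _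
  simp only [Function.comp_apply]
  rw [List.count_flatMap]
  simp only [Function.comp_def]
  have hnd : (PySem.List.pyRange 2 (PySem.List.len (pvChars o) + 1) 1).Nodup := by
    rw [PySem.List.pyRange_of_pos _ _ one_pos]
    refine List.Nodup.map ?_ List.nodup_range
    intro x y h
    simpa using h
  have h0 : ∀ i ∈ PySem.List.pyRange 2 (PySem.List.len (pvChars o) + 1) 1, i ≠ (c : Int) →
      (List.count s ((PySem.List.combinations (pvChars o) i.toNat).map String.ofList)) = 0 := by
    intro i hi hne
    have h2i : 2 ≤ i := (PySem.List.mem_pyRange_one.mp hi).1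
    rw [List.count_eq_zero]
    intro hmem
    obtain ⟨cs, hcs, heq⟩ := List.mem_map.mp hmem
    have hlen := PySem.List.length_of_mem_combinations hcs
    have : s.toList.length = i.toNat := by rw [← heq]; simpa using hlen
    omega
  rw [pvSumSingle hnd (c : Int) h0]
  by_cases hmem : (c : Int) ∈ PySem.List.pyRange 2 (PySem.List.len (pvChars o) + 1) 1
  · simp only [hmem, if_true, Int.toNat_natCast]
  · simp only [hmem, if_false]
    have h2 : ¬ ((c : Int) < PySem.List.len (pvChars o) + 1) := by
      intro hlt
      exact hmem (PySem.List.mem_pyRange_one.mpr ⟨by omega, hlt⟩)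
    rw [PySem.List.len_eq] at h2
    have : (pvChars o).length < c := by omega
    rw [PySem.List.combinations_eq_nil_of_length_lt _ this]
    simp

-- the items of A's `candis` dict: the sorted counter items with count >= 2
def pvS (orders : List String) : List (String × Int) :=
  (PySem.List.sorted2 (PySem.Dict.counter (pvAll orders)).items
      (fun x => PySem.Str.len x.1) (fun x => x.2) false).filter (fun kv => decide (2 ≤ kv.2))

-- the items A's inner loop keeps for course size c (in its traversal order)
def pvF (orders : List String) (c : Int) : List (String × Int) :=
  (PySem.List.sorted (pvS orders) (fun x => x.1) false).filter
    (fun kv => decide (PySem.Str.len kv.1 = c))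

lemma pvS_fst_nodup (orders : List String) : ((pvS orders).map (fun kv => kv.1)).Nodup := by
  have h1 : (((PySem.Dict.counter (pvAll orders)).items).map (fun kv => kv.1)).Nodup :=
    PySem.Dict.nodup_keys_counter (pvAll orders)
  have h2 := (PySem.List.sorted2_perm (PySem.Dict.counter (pvAll orders)).items
      (fun x => PySem.Str.len x.1) (fun x => x.2) false).map (fun kv => kv.1)
  have h3 := h2.nodup_iff.mpr h1
  exact h3.sublist (List.filter_sublist.map _)

lemma candis_items (orders : List String) : (solA_candis orders).items = pvS orders := by
  unfold solA_candis
  rw [candi_eq]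
  have hstep : (fun (d : PySem.Dict String Int) (kv : String × Int) =>
      if 2 ≤ kv.2 then d.insert kv.1 kv.2 else d)
      = fun d kv => if (fun kv : String × Int => decide (2 ≤ kv.2)) kv = true
          then d.insert kv.1 kv.2 else d := by
    funext d kv
    simp
  rw [hstep, ← List.foldl_filter]
  have hfresh : ∀ a ∈ pvS orders, (PySem.Dict.empty : PySem.Dict String Int).contains a.1 = false :=
    fun a _ => PySem.Dict.contains_empty a.1
  have := PySem.Dict.items_foldl_insert_fresh (pvS orders) (fun kv => kv.1) (fun kv => kv.2)
    PySem.Dict.empty hfresh (pvS_fst_nodup orders)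
  simpa using this

lemma pvFoldPair {γ δ ε : Type} (l : List γ) (p : γ → Bool) (f : δ → γ → δ) (g : ε → γ → ε)
    (a : δ) (b : ε) :
    l.foldl (fun st x => if p x then (f st.1 x, g st.2 x) else st) (a, b)
      = ((l.filter p).foldl f a, (l.filter p).foldl g b) := by
  induction l generalizing a b with
  | nil => simp
  | cons x t ih =>
    simp only [List.foldl_cons, List.filter_cons]
    by_cases h : p x <;> simp [h, ih]

lemma row_eq (orders : List String) (c : Int) :
    solA_row (solA_candis orders) c
      = ((pvF orders c).foldl (fun d kv => d.modify kv.2 [] (fun l => l ++ [kv.1])) PySem.Dict.empty,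
         (pvF orders c).foldl (fun m kv => max m kv.2) 0) := by
  unfold solA_row
  rw [candis_items]
  have hstep : (fun (st : PySem.Dict Int (List String) × Int) (kv : String × Int) =>
      if PySem.Str.len kv.1 = c then
        ((if st.1.contains kv.2 then st.1.modify kv.2 [] (fun l => l ++ [kv.1])
          else st.1.insert kv.2 [kv.1]),
         max st.2 kv.2)
      else st)
      = fun st kv => if decide (PySem.Str.len kv.1 = c) = true
          then (st.1.modify kv.2 [] (fun l => l ++ [kv.1]), max st.2 kv.2) else st := by
    funext st kv
    by_cases h : PySem.Str.len kv.1 = c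
    · simp only [h, if_pos, decide_true]
      by_cases hct : st.1.contains kv.2
      · simp [hct]
      · simp only [Bool.not_eq_true] at hct
        rw [if_neg (by simp [hct])]
        simp [PySem.Dict.modify, PySem.Dict.getD_of_not_contains _ _ hct]
    · rw [if_neg h, if_neg (by simpa using h)]
  rw [hstep]
  exact pvFoldPair (PySem.List.sorted (pvS orders) (fun x => x.1) false)
    (fun kv : String × Int => decide (PySem.Str.len kv.1 = c))
    (fun d kv => d.modify kv.2 [] (fun l => l ++ [kv.1]))
    (fun mm kv => max mm kv.2) PySem.Dict.empty 0

lemma solB_count_eq (orders : List String) (c : Int) :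
    solB_count (orders.map (fun o => String.ofList (PySem.List.sorted o.toList (fun x => x) false))) c
      = PySem.Dict.counter (pvCombos orders c.toNat) := by
  unfold solB_count pvCombos pvChars
  rw [List.flatMap_map]
  simp

lemma mem_pvS (orders : List String) (kv : String × Int) :
    kv ∈ pvS orders
      ↔ kv.1 ∈ pvAll orders ∧ kv.2 = ((pvAll orders).count kv.1 : Int) ∧ 2 ≤ kv.2 := by
  unfold pvS
  rw [List.mem_filter, (PySem.List.sorted2_perm _ _ _ _).mem_iff, PySem.Dict.items_counter]
  simp only [List.mem_map, PySem.Set.mem_ofList, decide_eq_true_eq]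
  constructor
  · rintro ⟨⟨k, hk, heq⟩, h2⟩
    subst heq
    exact ⟨hk, rfl, h2⟩
  · rintro ⟨h1, h2, h3⟩
    exact ⟨⟨kv.1, h1, by rw [← h2]⟩, h3⟩

lemma mem_pvF_raw (orders : List String) (c : Int) (kv : String × Int) :
    kv ∈ pvF orders c
      ↔ kv.1 ∈ pvAll orders ∧ kv.2 = ((pvAll orders).count kv.1 : Int) ∧ 2 ≤ kv.2
          ∧ PySem.Str.len kv.1 = c := by
  unfold pvF
  rw [List.mem_filter, PySem.List.mem_sorted, mem_pvS]
  simp only [decide_eq_true_eq]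
  tauto

lemma mem_pvF (orders : List String) (c : Int) (hc : 2 ≤ c) (kv : String × Int) :
    kv ∈ pvF orders c
      ↔ kv.1 ∈ pvCombos orders c.toNat
          ∧ kv.2 = ((pvCombos orders c.toNat).count kv.1 : Int) ∧ 2 ≤ kv.2 := by
  rw [mem_pvF_raw]
  constructor
  · rintro ⟨h1, h2, h3, h4⟩
    rw [PySem.Str.len_eq] at h4
    have hlc : kv.1.toList.length = c.toNat := by omega
    have hmem := ((mem_pvAll_iff orders kv.1).mp h1).2
    rw [hlc] at hmem
    refine ⟨hmem, ?_, h3⟩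
    rw [h2, count_pvAll orders c.toNat kv.1 (by omega) hlc]
  · rintro ⟨h1, h2, h3⟩
    have hlc := mem_pvCombos_len orders c.toNat kv.1 h1
    have hall : kv.1 ∈ pvAll orders :=
      (mem_pvAll_iff orders kv.1).mpr ⟨by omega, by rw [hlc]; exact h1⟩
    refine ⟨hall, ?_, h3, ?_⟩
    · rw [h2, count_pvAll orders c.toNat kv.1 (by omega) hlc]
    · rw [PySem.Str.len_eq]
      omega

lemma pvLeMaxD {xs : List Int} {v : Int} (h : v ∈ xs) :
    v ≤ PySem.List.maxD xs (fun x => x) 0 := by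
  cases hm : PySem.List.max? xs (fun x => x) with
  | none =>
    rw [(PySem.List.max?_eq_none_iff _ _).mp hm] at h
    exact absurd h List.not_mem_nil
  | some m =>
    have := PySem.List.max?_isMax hm v h
    simpa [PySem.List.maxD, hm] using this

lemma pvAc_of_F_nil (orders : List String) (c : Int) (h : pvF orders c = []) :
    pvAc orders c = [] := by
  rw [pvAc, row_eq, h]
  simp [PySem.Dict.contains_empty]

lemma perC (orders : List String) (c : Int) : (pvAc orders c).Perm (pvBc orders c) := by
  by_cases hc : c < 2
  · -- no key of A's dict has length < 2, and B skips such sizes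
    have hF : pvF orders c = [] := by
      rw [List.eq_nil_iff_forall_not_mem]
      intro kv hkv
      obtain ⟨h1, -, -, h4⟩ := (mem_pvF_raw orders c kv).mp hkv
      have h2 := ((mem_pvAll_iff orders kv.1).mp h1).1
      rw [PySem.Str.len_eq] at h4
      omega
    rw [pvAc_of_F_nil orders c hF]
    rw [pvBc, if_pos (Or.inl hc)]
  · have hc2 : (2 : Int) ≤ c := by omega
    by_cases hbig : PySem.List.maxD (orders.map (fun o => PySem.Str.len o)) (fun x => x) 0 < c
    · -- c exceeds every order's length: no combination of size c exists on either side
      have hF : pvF orders c = [] := by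
        rw [List.eq_nil_iff_forall_not_mem]
        intro kv hkv
        obtain ⟨h1, -, -⟩ := (mem_pvF orders c hc2 kv).mp hkv
        simp only [pvCombos, List.mem_flatMap, List.mem_map] at h1
        obtain ⟨o, ho, cs, hcs, -⟩ := h1
        have hlen := PySem.List.length_of_mem_combinations hcs
        have hle : cs.length ≤ (pvChars o).length :=
          (PySem.List.sublist_of_mem_combinations hcs).length_le
        have holen : (pvChars o).length = o.toList.length :=
          (PySem.List.sorted_perm _ _ _).length_eq
        have hml : PySem.Str.len o ≤ PySem.List.maxD (orders.map (fun o => PySem.Str.len o)) (fun x => x) 0 :=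
          pvLeMaxD (List.mem_map_of_mem ho)
        rw [PySem.Str.len_eq] at hml
        omega
      rw [pvAc_of_F_nil orders c hF, pvBc, if_pos (Or.inr hbig)]
    have hBc : pvBc orders c
        = (if 2 ≤ PySem.List.maxD (PySem.Dict.counter (pvCombos orders c.toNat)).values (fun x => x) 0 then
            ((PySem.Dict.counter (pvCombos orders c.toNat)).items.filter
              (fun kv => kv.2 == PySem.List.maxD (PySem.Dict.counter (pvCombos orders c.toNat)).values (fun x => x) 0)).map
              (fun kv => kv.1)
          else []) := by
      rw [pvBc, if_neg (by push_neg; exact ⟨by omega, by omega⟩), solB_count_eq]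
    set K := pvCombos orders c.toNat with hK
    set m := PySem.List.maxD (PySem.Dict.counter K).values (fun x => x) 0 with hm
    have hvals : (PySem.Dict.counter K).values
        = (PySem.Set.ofList K).map (fun k => ((K.count k : Int))) := by
      show ((PySem.Dict.counter K).items).map (fun x => x.2) = _
      rw [PySem.Dict.items_counter]
      simp
    by_cases h2m : 2 ≤ m
    · -- the winning count m is at least 2: both sides list the keys of count m
      have hvne : (PySem.Dict.counter K).values ≠ [] := by
        intro hnil
        rw [hm, PySem.List.maxD] at h2m
        rw [(PySem.List.max?_eq_none_iff _ _).mpr hnil] at h2m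
        simp at h2m
      obtain ⟨m', hm'⟩ : ∃ m', PySem.List.max? (PySem.Dict.counter K).values (fun x => x) = some m' := by
        cases h : PySem.List.max? (PySem.Dict.counter K).values (fun x => x) with
        | none => exact absurd ((PySem.List.max?_eq_none_iff _ _).mp h) hvne
        | some v => exact ⟨v, rfl⟩
      have hmm' : m = m' := by rw [hm, PySem.List.maxD, hm']; rfl
      have hmax : ∀ v ∈ (PySem.Dict.counter K).values, v ≤ m := by
        intro v hv
        rw [hmm']
        exact PySem.List.max?_isMax hm' v hv
      have hmMem : m ∈ (PySem.Dict.counter K).values := hmm' ▸ PySem.List.max?_mem hm'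
      rw [hvals] at hmax hmMem
      obtain ⟨k0, hk0, hk0m⟩ := List.mem_map.mp hmMem
      have hk0K : k0 ∈ K := (PySem.Set.mem_ofList _ _).mp hk0
      have hk0F : (k0, m) ∈ pvF orders c := by
        rw [mem_pvF orders c hc2]
        exact ⟨hk0K, hk0m.symm, h2m⟩
      -- the running maximum equals m
      have hmaxv : (pvF orders c).foldl (fun mm kv => max mm kv.2) 0 = m := by
        have hge : m ≤ (pvF orders c).foldl (fun mm kv => max mm kv.2) 0 := by
          have := (PySem.List.le_foldl_max_int (pvF orders c) (fun kv => kv.2) 0).2 _ hk0F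
          simpa using this
        have hle : (pvF orders c).foldl (fun mm kv => max mm kv.2) 0 ≤ m := by
          have hrw : (pvF orders c).foldl (fun mm kv => max mm kv.2) 0
              = ((pvF orders c).map (fun kv => kv.2)).foldl max 0 := by
            rw [List.foldl_map]
          rw [hrw]
          rcases PySem.List.foldl_max_mem ((pvF orders c).map (fun kv => kv.2)) 0 with h | h
          · rw [h]; omega
          · obtain ⟨kv, hkv, hkv2⟩ := List.mem_map.mp h
            obtain ⟨hk1, hk2, -⟩ := (mem_pvF orders c hc2 kv).mp hkv
            rw [← hkv2, hk2]
            exact hmax _ (List.mem_map_of_mem ((PySem.Set.mem_ofList _ _).mpr hk1))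
        omega
      -- A's tmp dict, evaluated at m
      have htmp : ((pvF orders c).foldl
            (fun d kv => d.modify kv.2 [] (fun l => l ++ [kv.1])) PySem.Dict.empty).getD m []
          = ((pvF orders c).filter (fun kv => kv.2 == m)).map (fun kv => kv.1) := by
        have hswap : (pvF orders c).foldl
              (fun d kv => d.modify kv.2 [] (fun l => l ++ [kv.1])) PySem.Dict.empty
            = ((pvF orders c).map Prod.swap).foldl
              (fun d p => d.modify p.1 [] (fun l => l ++ [p.2])) PySem.Dict.empty := by
          rw [List.foldl_map]
          rfl
        rw [hswap, PySem.Dict.getD_foldl_modify_append, PySem.Dict.getD_empty]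
        rw [List.filter_map, List.map_map]
        simp [Function.comp_def, Prod.swap]
      have hcont : (((pvF orders c).foldl
            (fun d kv => d.modify kv.2 [] (fun l => l ++ [kv.1])) PySem.Dict.empty).contains m) = true := by
        rw [PySem.Dict.contains_iff_mem_keys, PySem.Dict.keys_foldl_modify_key,
          PySem.Dict.keys_empty, PySem.Set.update_nil_left, PySem.Set.mem_ofList]
        exact List.mem_map_of_mem hk0F
      have hAc : pvAc orders c = ((pvF orders c).filter (fun kv => kv.2 == m)).map (fun kv => kv.1) := by
        rw [pvAc, row_eq]
        simp only [hmaxv, hcont, if_true, htmp]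
      rw [hAc, hBc, if_pos h2m, PySem.Dict.items_counter]
      -- both are duplicate-free lists of the same keys
      have hndA : (((pvF orders c).filter (fun kv => kv.2 == m)).map (fun kv => kv.1)).Nodup := by
        have hnd1 : ((PySem.List.sorted (pvS orders) (fun x => x.1) false).map (fun kv => kv.1)).Nodup :=
          ((PySem.List.sorted_perm _ _ _).map _).nodup_iff.mpr (pvS_fst_nodup orders)
        have hsub : (((pvF orders c).filter (fun kv => kv.2 == m)).map (fun kv => kv.1)).Sublist
            ((PySem.List.sorted (pvS orders) (fun x => x.1) false).map (fun kv => kv.1)) := by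
          refine List.Sublist.map _ ?_
          exact List.filter_sublist.trans List.filter_sublist
        exact hnd1.sublist hsub
      have hndB : ((((PySem.Set.ofList K).map (fun k => (k, (K.count k : Int)))).filter
            (fun kv => kv.2 == m)).map (fun kv => kv.1)).Nodup := by
        rw [List.filter_map, List.map_map]
        have : ((fun kv : String × Int => kv.1) ∘ fun k => (k, (K.count k : Int))) = id := rfl
        rw [this, List.map_id]
        exact (PySem.Set.nodup_ofList K).filter _
      rw [List.perm_ext_iff_of_nodup hndA hndB]
      intro x
      simp only [List.mem_map, List.mem_filter, beq_iff_eq]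
      constructor
      · rintro ⟨kv, ⟨hkv, hkv2⟩, rfl⟩
        obtain ⟨h1, h2, -⟩ := (mem_pvF orders c hc2 kv).mp hkv
        refine ⟨(kv.1, (K.count kv.1 : Int)),
          ⟨⟨kv.1, (PySem.Set.mem_ofList _ _).mpr h1, rfl⟩, ?_⟩, rfl⟩
        rw [← h2, hkv2]
      · rintro ⟨kv, ⟨hkv, hkv2⟩, rfl⟩
        obtain ⟨k, hk, rfl⟩ := hkv
        refine ⟨(k, m), ⟨?_, rfl⟩, rfl⟩
        rw [mem_pvF orders c hc2]
        simp only at hkv2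
        exact ⟨(PySem.Set.mem_ofList _ _).mp hk, hkv2.symm, h2m⟩
    · -- every count is below 2: A keeps nothing and B's guard fails
      have hF : pvF orders c = [] := by
        rw [List.eq_nil_iff_forall_not_mem]
        intro kv hkv
        obtain ⟨h1, h2, h3⟩ := (mem_pvF orders c hc2 kv).mp hkv
        have hvmem : kv.2 ∈ (PySem.Dict.counter K).values := by
          rw [hvals, h2]
          exact List.mem_map_of_mem ((PySem.Set.mem_ofList _ _).mpr h1)
        have hvne : (PySem.Dict.counter K).values ≠ [] := by
          intro hnil
          rw [hnil] at hvmem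
          exact absurd hvmem (List.not_mem_nil)
        obtain ⟨m', hm'⟩ : ∃ m', PySem.List.max? (PySem.Dict.counter K).values (fun x => x) = some m' := by
          cases h : PySem.List.max? (PySem.Dict.counter K).values (fun x => x) with
          | none => exact absurd ((PySem.List.max?_eq_none_iff _ _).mp h) hvne
          | some v => exact ⟨v, rfl⟩
        have hmm' : m = m' := by rw [hm, PySem.List.maxD, hm']; rfl
        have := PySem.List.max?_isMax hm' kv.2 hvmem
        simp only at this
        omega
      rw [pvAc_of_F_nil orders c hF, hBc, if_neg h2m]

lemma A_answer (orders : List String) (course : List Int) :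
    solution orders course
      = PySem.List.sorted ((PySem.Set.ofList course).flatMap (pvAc orders)) (fun x => x) false := by
  simp only [solution]
  congr 1
  have h : (fun (answer : List String) (c : Int) =>
      let st := solA_row (solA_candis orders) c
      if st.1.contains st.2 then answer ++ st.1.getD st.2 [] else answer)
      = fun answer c => answer ++ (let st := solA_row (solA_candis orders) c;
          if st.1.contains st.2 then st.1.getD st.2 [] else []) := by
    funext ans c
    simp only []
    split <;> simp
  rw [h, PySem.List.foldl_append_eq_flatMap]
  rfl

lemma B_answer (orders : List String) (course : List Int) :
    solution_alt orders course
      = PySem.List.sorted ((PySem.Set.ofList course).flatMap (pvBc orders)) (fun x => x) false := by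
  simp only [solution_alt]
  congr 1
  have h : (fun (answer : List String) (c : Int) =>
      if c < 2 ∨ PySem.List.maxD (orders.map (fun o => PySem.Str.len o)) (fun x => x) 0 < c then answer
      else
        let cnt := solB_count (orders.map (fun o => String.ofList (PySem.List.sorted o.toList (fun x => x) false))) c
        let m := PySem.List.maxD cnt.values (fun x => x) 0
        if 2 ≤ m then answer ++ (cnt.items.filter (fun kv => kv.2 == m)).map (fun kv => kv.1)
        else answer)
      = fun answer c => answer ++ (if c < 2 ∨ PySem.List.maxD (orders.map (fun o => PySem.Str.len o)) (fun x => x) 0 < c then []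
        else
          let cnt := solB_count (orders.map (fun o => String.ofList (PySem.List.sorted o.toList (fun x => x) false))) c
          let m := PySem.List.maxD cnt.values (fun x => x) 0
          if 2 ≤ m then (cnt.items.filter (fun kv => kv.2 == m)).map (fun kv => kv.1) else []) := by
    funext ans c
    simp only []
    split
    · simp
    · split <;> simp
  rw [h, PySem.List.foldl_append_eq_flatMap]
  rfl

-- ===== VERDICT (by name: the statement is the Claim_ definition above) =====
theorem solution_spec : Claim_equal_solution := by
  intro orders course _
  show solution orders course = solution_alt orders course
  rw [A_answer, B_answer]
  rw [PySem.List.sorted_id_eq_sorted_id_iff_perm]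
  exact List.Perm.flatMap (List.Perm.refl _) (fun c _ => perC orders c)
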